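-- pv_equiv track=rewrite | github.com/Pymol-Scripts/Pymol-script-repo | propka.py | ResiRange
-- ===== SOURCE A (Python) =====
-- def ResiRange(resi):
-- 	resi = resi.split('.')
-- 	resiList = []
-- 	for i in resi:
-- 		if '-' in i:
-- 			tmp = i.split('-')
-- 			resiList.extend(range(int(tmp[0]),int(tmp[-1])+1))
-- 		if '-' not in i:
-- 			resiList.append(int(i))
-- 	return(resiList)
-- ===== SOURCE B (Python) =====
-- def _last(tok):
--     d = tok.find('-')
--     return _last(tok[d + 1:]) if d != -1 else int(tok)
--
-- def ResiRange(resi):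
--     d = resi.find('.')
--     if d != -1:
--         return ResiRange(resi[:d]) + ResiRange(resi[d + 1:])
--     h = resi.find('-')
--     if h == -1:
--         return [int(resi)]
--     return list(range(int(resi[:h]), _last(resi[h + 1:]) + 1))
-- ===== Notes on version B (the rewrite author's own statement) =====
-- stated objective: alternative
-- what changed: Replaces A's split('.')-then-two-branch loop with a recursive descent that never calls split: find the first '.', recurse on both sides of it, and expand a dotless piece from its first '-' with slicing and a recursive last-number helper; Pre_ excludes only inputs where some token fails int(), on which both A and B raise ValueError.
-- outside the precondition, e.g. on ResiRange('-'): A raises ValueError, B raises ValueError; on ResiRange('.'): A raises ValueError, B raises ValueError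
import Mathlib
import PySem

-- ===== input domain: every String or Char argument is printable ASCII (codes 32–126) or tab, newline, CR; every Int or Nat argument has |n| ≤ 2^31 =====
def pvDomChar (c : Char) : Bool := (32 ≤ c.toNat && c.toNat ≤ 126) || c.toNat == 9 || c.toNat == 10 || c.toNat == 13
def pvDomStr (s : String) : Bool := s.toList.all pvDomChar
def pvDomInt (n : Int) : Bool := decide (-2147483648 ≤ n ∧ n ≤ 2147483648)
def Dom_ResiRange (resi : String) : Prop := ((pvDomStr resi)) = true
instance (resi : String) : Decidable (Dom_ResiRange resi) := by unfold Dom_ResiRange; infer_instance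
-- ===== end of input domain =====

-- B replaces A's split-tokens-then-branch loop by a recursive descent on the string itself
-- (find the first '.', recurse on both sides; a dotless piece is expanded from its first '-'
-- with a recursive last-number helper): different decomposition, same cost.

-- termination helper for the B port (cited by name in decreasing_by)
theorem pvFind_toNat_lt_length (cs : List Char) (c : Char)
    (h : PySem.Chars.find cs [c] ≠ -1) : (PySem.Chars.find cs [c]).toNat < cs.length := by
  have h0 : 0 ≤ PySem.Chars.find cs [c] := by
    have := PySem.Chars.neg_one_le_find cs [c]
    omega
  obtain ⟨hp, -⟩ := PySem.Chars.find_spec h0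
  obtain ⟨t, ht⟩ := hp
  by_contra hge
  have hnil : List.drop (PySem.Chars.find cs [c]).toNat cs = [] :=
    List.drop_eq_nil_of_le (by omega)
  rw [hnil] at ht
  simp at ht

-- ===== PORT A =====
-- int() is ported as (PySem.Int.ofChars? …).getD 0; Pre_ restricts to inputs where every
-- needed int() succeeds, exactly where the Python A returns without a ValueError.
def ResiRange (resi : String) : List Int :=
  let toks := PySem.Chars.splitOn resi.toList ['.']
  toks.foldl (fun resiList i =>
    let resiList :=
      if PySem.Chars.isIn ['-'] i then
        let tmp := PySem.Chars.splitOn i ['-']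
        resiList ++ PySem.List.pyRange
          ((PySem.Int.ofChars? (PySem.List.pyGetD tmp 0 [])).getD 0)
          ((PySem.Int.ofChars? (PySem.List.pyGetD tmp (-1) [])).getD 0 + 1) 1
      else resiList
    if !(PySem.Chars.isIn ['-'] i) then
      resiList ++ [(PySem.Int.ofChars? i).getD 0]
    else resiList) []

-- ===== PORT B =====
-- _last: drop everything up to the first '-' recursively, int() the final dashless piece.
def pvLastNum (tok : List Char) : Int :=
  let d := PySem.Chars.find tok ['-']
  if h : d ≠ -1 then pvLastNum (PySem.List.slice tok (some (d + 1)) none)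
  else (PySem.Int.ofChars? tok).getD 0
termination_by tok.length
decreasing_by
  have h0 : 0 ≤ PySem.Chars.find tok ['-'] := by
    have := PySem.Chars.neg_one_le_find tok ['-']
    omega
  have hlt := pvFind_toNat_lt_length tok '-' h
  rw [PySem.List.slice_from tok (by omega)]
  simp only [List.length_drop]
  omega

def ResiRangeAltChars (cs : List Char) : List Int :=
  let d := PySem.Chars.find cs ['.']
  if hd : d ≠ -1 then
    ResiRangeAltChars (PySem.List.slice cs none (some d)) ++
    ResiRangeAltChars (PySem.List.slice cs (some (d + 1)) none)
  else
    let h := PySem.Chars.find cs ['-']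
    if h = -1 then [(PySem.Int.ofChars? cs).getD 0]
    else
      PySem.List.pyRange
        ((PySem.Int.ofChars? (PySem.List.slice cs none (some h))).getD 0)
        (pvLastNum (PySem.List.slice cs (some (h + 1)) none) + 1) 1
termination_by cs.length
decreasing_by
  · have h0 : 0 ≤ PySem.Chars.find cs ['.'] := by
      have := PySem.Chars.neg_one_le_find cs ['.']
      omega
    have hlt := pvFind_toNat_lt_length cs '.' hd
    rw [PySem.List.slice_to cs h0]
    simp only [List.length_take]
    omega
  · have h0 : 0 ≤ PySem.Chars.find cs ['.'] := by
      have := PySem.Chars.neg_one_le_find cs ['.']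
      omega
    have hlt := pvFind_toNat_lt_length cs '.' hd
    rw [PySem.List.slice_from cs (by omega)]
    simp only [List.length_drop]
    omega

def ResiRange_alt (resi : String) : List Int := ResiRangeAltChars resi.toList

-- ===== PRECONDITION & SPEC =====
-- Pre_ excludes exactly the inputs on which A raises ValueError: some dot-token whose first
-- or last '-'-piece is not parseable by int().  (B raises on exactly the same inputs.)
def Pre_ResiRange (resi : String) : Prop :=
  ∀ tok ∈ PySem.Chars.splitOn resi.toList ['.'],
    (PySem.Int.ofChars? (PySem.List.pyGetD (PySem.Chars.splitOn tok ['-']) 0 [])).isSome = true ∧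
    (PySem.Int.ofChars? (PySem.List.pyGetD (PySem.Chars.splitOn tok ['-']) (-1) [])).isSome = true
instance (resi : String) : Decidable (Pre_ResiRange resi) := by unfold Pre_ResiRange; infer_instance
def pvWitness_ResiRange : String := "1.3-5"
def Spec_ResiRange (resi : String) (out : List Int) : Prop := out = ResiRange_alt resi
instance (resi : String) (out : List Int) : Decidable (Spec_ResiRange resi out) := by unfold Spec_ResiRange; infer_instance

-- ===== CLAIM (what is proved, stated in full; the proofs are below) =====
def Claim_equal_ResiRange : Prop := ∀ (resi : String), Dom_ResiRange resi → Pre_ResiRange resi → Spec_ResiRange resi (ResiRange resi)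

-- ===== LEMMAS AND PROOFS =====

-- A's per-token contribution, named for the proofs.
def pvTok (tok : List Char) : List Int :=
  PySem.List.pyRange
    ((PySem.Int.ofChars? (PySem.List.pyGetD (PySem.Chars.splitOn tok ['-']) 0 [])).getD 0)
    ((PySem.Int.ofChars? (PySem.List.pyGetD (PySem.Chars.splitOn tok ['-']) (-1) [])).getD 0 + 1) 1

-- a structural model of splitOn with a single-character separator
def pvSplit (c : Char) (pre : List Char) : List Char → List (List Char)
  | [] => [pre]
  | x :: rest => if x = c then pre :: pvSplit c [] rest else pvSplit c (pre ++ [x]) rest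

theorem pvSplit_go_eq (c : Char) :
    ∀ (l : List Char) (fuel : Nat) (cur : List Char) (acc : List (List Char)),
      l.length ≤ fuel →
      PySem.Chars.splitOn.go [c] fuel l cur acc = acc.reverse ++ pvSplit c cur.reverse l := by
  intro l
  induction l with
  | nil =>
    intro fuel cur acc _
    cases fuel <;> simp [PySem.Chars.splitOn.go, pvSplit]
  | cons x rest ih =>
    intro fuel cur acc hle
    cases fuel with
    | zero => simp at hle
    | succ f =>
      by_cases hx : x = c
      · subst hx
        have hp : List.isPrefixOf [x] (x :: rest) = true := by simp [List.isPrefixOf]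
        rw [PySem.Chars.splitOn.go, hp]
        simp only [if_true]
        rw [show List.drop (List.length [x]) (x :: rest) = rest from by simp]
        rw [ih f [] (cur.reverse :: acc) (by simpa using hle)]
        simp [pvSplit]
      · have hp : List.isPrefixOf [c] (x :: rest) = false := by
          simp [List.isPrefixOf, Ne.symm hx]
        rw [PySem.Chars.splitOn.go, hp]
        simp only [Bool.false_eq_true, if_false]
        rw [ih f (x :: cur) acc (by simpa using hle)]
        simp [pvSplit, hx]

theorem splitOn_eq_pvSplit (c : Char) (l : List Char) :
    PySem.Chars.splitOn l [c] = pvSplit c [] l := by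
  unfold PySem.Chars.splitOn
  rw [pvSplit_go_eq c l (l.length + 1) [] [] (by omega)]
  simp

theorem pvSplit_ne_nil (c : Char) (pre l : List Char) : pvSplit c pre l ≠ [] := by
  induction l generalizing pre with
  | nil => simp [pvSplit]
  | cons x rest ih =>
    simp only [pvSplit]
    split_ifs
    · simp
    · exact ih _

theorem splitOn_ne_nil (c : Char) (l : List Char) : PySem.Chars.splitOn l [c] ≠ [] := by
  rw [splitOn_eq_pvSplit]
  exact pvSplit_ne_nil c [] l

theorem pvSplit_not_mem (c : Char) (pre l : List Char) (h : c ∉ l) :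
    pvSplit c pre l = [pre ++ l] := by
  induction l generalizing pre with
  | nil => simp [pvSplit]
  | cons x rest ih =>
    have hx : x ≠ c := fun he => h (he ▸ List.mem_cons_self)
    simp only [pvSplit, if_neg hx]
    rw [ih _ (fun hm => h (List.mem_cons_of_mem _ hm))]
    simp

theorem pvSplit_append (c : Char) (pre s t : List Char) (h : c ∉ s) :
    pvSplit c pre (s ++ c :: t) = (pre ++ s) :: pvSplit c [] t := by
  induction s generalizing pre with
  | nil => simp [pvSplit]
  | cons x rest ih =>
    have hx : x ≠ c := fun he => h (he ▸ List.mem_cons_self)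
    simp only [List.cons_append, pvSplit, if_neg hx]
    rw [ih _ (fun hm => h (List.mem_cons_of_mem _ hm))]
    simp

theorem splitOn_head_split (c : Char) (s t : List Char) (h : c ∉ s) :
    PySem.Chars.splitOn (s ++ c :: t) [c] = s :: PySem.Chars.splitOn t [c] := by
  rw [splitOn_eq_pvSplit, splitOn_eq_pvSplit, pvSplit_append c [] s t h]
  simp

theorem splitOn_not_mem (c : Char) (l : List Char) (h : c ∉ l) :
    PySem.Chars.splitOn l [c] = [l] := by
  rw [splitOn_eq_pvSplit, pvSplit_not_mem c [] l h]
  simp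

-- singleton infix ↔ membership
theorem singleton_infix_iff_mem (c : Char) (l : List Char) : [c] <:+: l ↔ c ∈ l := by
  constructor
  · intro h
    exact h.subset (List.mem_singleton_self c)
  · intro h
    obtain ⟨s, t, rfl⟩ := List.append_of_mem h
    exact ⟨s, t, by simp⟩

theorem find_eq_neg_one_of_not_mem (c : Char) (l : List Char) (h : c ∉ l) :
    PySem.Chars.find l [c] = -1 := by
  rw [PySem.Chars.find_eq_neg_one_iff, singleton_infix_iff_mem]
  exact h

theorem not_mem_of_find_eq_neg_one (c : Char) (l : List Char)
    (h : PySem.Chars.find l [c] = -1) : c ∉ l := by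
  rw [PySem.Chars.find_eq_neg_one_iff, singleton_infix_iff_mem] at h
  exact h

-- a found single-character separator decomposes the string at its first occurrence
theorem find_found_split (c : Char) (l : List Char)
    (h : PySem.Chars.find l [c] ≠ -1) :
    ∃ s t : List Char, l = s ++ c :: t ∧ (s.length : Int) = PySem.Chars.find l [c] ∧ c ∉ s := by
  have h0 : 0 ≤ PySem.Chars.find l [c] := by
    have := PySem.Chars.neg_one_le_find l [c]
    omega
  obtain ⟨hp, hmin⟩ := PySem.Chars.find_spec h0
  obtain ⟨t, ht⟩ := hp
  have hlt : (PySem.Chars.find l [c]).toNat < l.length := pvFind_toNat_lt_length l c h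
  have hdropc : List.drop (PySem.Chars.find l [c]).toNat l
      = c :: List.drop ((PySem.Chars.find l [c]).toNat + 1) l := by
    have h2 := List.drop_eq_getElem_cons hlt
    rw [h2] at ht
    injection ht with hc _
    rw [h2, ← hc]
  refine ⟨l.take (PySem.Chars.find l [c]).toNat,
          List.drop ((PySem.Chars.find l [c]).toNat + 1) l, ?_, ?_, ?_⟩
  · conv_lhs => rw [← List.take_append_drop (PySem.Chars.find l [c]).toNat l]
    rw [hdropc]
  · have hlen : (l.take (PySem.Chars.find l [c]).toNat).length
        = (PySem.Chars.find l [c]).toNat := by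
      simp [List.length_take, Nat.min_eq_left hlt.le]
    rw [hlen]
    omega
  · intro hmem
    obtain ⟨i, hi, hgi⟩ := List.mem_iff_getElem.mp hmem
    have hin : i < (PySem.Chars.find l [c]).toNat := by
      simpa [List.length_take, Nat.min_eq_left hlt.le] using hi
    apply hmin i hin
    have hil : i < l.length := lt_trans hin hlt
    refine ⟨List.drop (i + 1) l, ?_⟩
    have hli : l[i] = c := by
      rw [← hgi]
      simp [List.getElem_take]
    rw [List.drop_eq_getElem_cons hil, hli]
    simp

-- xs[-1] of a cons with nonempty tail is the tail's xs[-1]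
theorem pyGetD_neg_one_cons (a : List Char) (xs : List (List Char)) (d : List Char)
    (h : xs ≠ []) :
    PySem.List.pyGetD (a :: xs) (-1) d = PySem.List.pyGetD xs (-1) d := by
  rw [PySem.List.pyGetD_neg_one (a :: xs) d (by simp), PySem.List.pyGetD_neg_one xs d h]
  exact List.getLast_cons h

-- pvLastNum computes int() of the last '-'-piece
theorem pvLastNum_eq_aux : ∀ (N : Nat) (cs : List Char), cs.length ≤ N →
    pvLastNum cs =
      (PySem.Int.ofChars? (PySem.List.pyGetD (PySem.Chars.splitOn cs ['-']) (-1) [])).getD 0 := by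
  intro N
  induction N with
  | zero =>
    intro cs hle
    have hnil : cs = [] := List.eq_nil_of_length_eq_zero (by omega)
    subst hnil
    rw [pvLastNum, splitOn_not_mem '-' [] (by simp)]
    simp [find_eq_neg_one_of_not_mem '-' [] (by simp), PySem.List.pyGetD_neg_one]
  | succ n ih =>
    intro cs hle
    rw [pvLastNum]
    by_cases hf : PySem.Chars.find cs ['-'] = -1
    · have hnm := not_mem_of_find_eq_neg_one '-' cs hf
      rw [splitOn_not_mem '-' cs hnm]
      simp [hf, PySem.List.pyGetD_neg_one]
    · obtain ⟨s, t, hdec, hlen, hns⟩ := find_found_split '-' cs hf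
      have h0 : 0 ≤ PySem.Chars.find cs ['-'] := by
        have := PySem.Chars.neg_one_le_find cs ['-']
        omega
      simp only [hf, ne_eq, not_false_eq_true, dite_true]
      have hslice : PySem.List.slice cs (some (PySem.Chars.find cs ['-'] + 1)) none = t := by
        rw [PySem.List.slice_from cs (by omega)]
        have htn : (PySem.Chars.find cs ['-'] + 1).toNat = s.length + 1 := by omega
        rw [htn, hdec]
        rw [show s ++ '-' :: t = (s ++ ['-']) ++ t from by simp]
        rw [show s.length + 1 = (s ++ ['-']).length from by simp]
        simp
      rw [hslice]
      have hts : t.length ≤ n := by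
        rw [hdec] at hle
        simp at hle
        omega
      rw [ih t hts, hdec, splitOn_head_split '-' s t hns,
        pyGetD_neg_one_cons s _ [] (splitOn_ne_nil '-' t)]

theorem pvLastNum_eq (cs : List Char) :
    pvLastNum cs =
      (PySem.Int.ofChars? (PySem.List.pyGetD (PySem.Chars.splitOn cs ['-']) (-1) [])).getD 0 :=
  pvLastNum_eq_aux cs.length cs le_rfl

-- on a dot-free token, B's base case computes A's per-token contribution
theorem tok_eq (tok : List Char) (h : '.' ∉ tok) : ResiRangeAltChars tok = pvTok tok := by
  rw [ResiRangeAltChars]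
  have hdot : PySem.Chars.find tok ['.'] = -1 := find_eq_neg_one_of_not_mem '.' tok h
  simp only [hdot, ne_eq, not_true_eq_false, dite_false]
  by_cases hf : PySem.Chars.find tok ['-'] = -1
  · have hnm := not_mem_of_find_eq_neg_one '-' tok hf
    rw [pvTok, splitOn_not_mem '-' tok hnm]
    simp [hf, PySem.List.pyGetD_neg_one, PySem.List.pyGetD_zero_cons,
          PySem.List.pyRange_one_singleton]
  · obtain ⟨s, t, hdec, hlen, hns⟩ := find_found_split '-' tok hf
    have h0 : 0 ≤ PySem.Chars.find tok ['-'] := by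
      have := PySem.Chars.neg_one_le_find tok ['-']
      omega
    simp only [hf, if_false]
    have hslice1 : PySem.List.slice tok none (some (PySem.Chars.find tok ['-'])) = s := by
      rw [PySem.List.slice_to tok h0]
      have : (PySem.Chars.find tok ['-']).toNat = s.length := by omega
      rw [this, hdec]
      simp
    have hslice2 : PySem.List.slice tok (some (PySem.Chars.find tok ['-'] + 1)) none = t := by
      rw [PySem.List.slice_from tok (by omega)]
      have htn : (PySem.Chars.find tok ['-'] + 1).toNat = s.length + 1 := by omega
      rw [htn, hdec]
      rw [show s ++ '-' :: t = (s ++ ['-']) ++ t from by simp]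
      rw [show s.length + 1 = (s ++ ['-']).length from by simp]
      simp
    rw [hslice1, hslice2, pvLastNum_eq t, pvTok, hdec, splitOn_head_split '-' s t hns,
      pyGetD_neg_one_cons s _ [] (splitOn_ne_nil '-' t), PySem.List.pyGetD_zero_cons]

-- one iteration of A's loop body appends exactly A's per-token contribution
theorem step_eq (acc : List Int) (tok : List Char) :
    (let resiList :=
      if PySem.Chars.isIn ['-'] tok then
        let tmp := PySem.Chars.splitOn tok ['-']
        acc ++ PySem.List.pyRange
          ((PySem.Int.ofChars? (PySem.List.pyGetD tmp 0 [])).getD 0)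
          ((PySem.Int.ofChars? (PySem.List.pyGetD tmp (-1) [])).getD 0 + 1) 1
      else acc
    if !(PySem.Chars.isIn ['-'] tok) then
      resiList ++ [(PySem.Int.ofChars? tok).getD 0]
    else resiList) = acc ++ pvTok tok := by
  by_cases h : PySem.Chars.isIn ['-'] tok = true
  · simp [h, pvTok]
  · have hnm : '-' ∉ tok := by
      intro hm
      apply h
      rw [PySem.Chars.isIn_iff_infix, singleton_infix_iff_mem]
      exact hm
    rw [pvTok, splitOn_not_mem '-' tok hnm]
    simp [h, PySem.List.pyGetD, PySem.List.pyIdx?, PySem.List.pyGet?,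
          PySem.List.pyRange_one_singleton]

-- A's whole loop is the concatenation of per-token contributions
theorem fold_eq : ∀ (toks : List (List Char)) (acc : List Int),
    toks.foldl (fun resiList i =>
      let resiList :=
        if PySem.Chars.isIn ['-'] i then
          let tmp := PySem.Chars.splitOn i ['-']
          resiList ++ PySem.List.pyRange
            ((PySem.Int.ofChars? (PySem.List.pyGetD tmp 0 [])).getD 0)
            ((PySem.Int.ofChars? (PySem.List.pyGetD tmp (-1) [])).getD 0 + 1) 1
        else resiList
      if !(PySem.Chars.isIn ['-'] i) then
        resiList ++ [(PySem.Int.ofChars? i).getD 0]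
      else resiList) acc = acc ++ toks.flatMap pvTok := by
  intro toks
  induction toks with
  | nil => intro acc; simp
  | cons t ts ih =>
    intro acc
    rw [List.foldl_cons, List.flatMap_cons]
    rw [step_eq acc t, ih, List.append_assoc]

-- B is the same concatenation over the dot-split
theorem alt_eq_aux : ∀ (N : Nat) (cs : List Char), cs.length ≤ N →
    ResiRangeAltChars cs = (PySem.Chars.splitOn cs ['.']).flatMap pvTok := by
  intro N
  induction N with
  | zero =>
    intro cs hle
    have hnil : cs = [] := List.eq_nil_of_length_eq_zero (by omega)
    subst hnil
    rw [tok_eq [] (by simp), splitOn_not_mem '.' [] (by simp)]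
    simp
  | succ n ih =>
    intro cs hle
    by_cases hf : PySem.Chars.find cs ['.'] = -1
    · have hnm := not_mem_of_find_eq_neg_one '.' cs hf
      rw [tok_eq cs hnm, splitOn_not_mem '.' cs hnm]
      simp
    · obtain ⟨s, t, hdec, hlen, hns⟩ := find_found_split '.' cs hf
      have h0 : 0 ≤ PySem.Chars.find cs ['.'] := by
        have := PySem.Chars.neg_one_le_find cs ['.']
        omega
      rw [ResiRangeAltChars]
      simp only [hf, ne_eq, not_false_eq_true, dite_true]
      have hslice1 : PySem.List.slice cs none (some (PySem.Chars.find cs ['.'])) = s := by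
        rw [PySem.List.slice_to cs h0]
        have : (PySem.Chars.find cs ['.']).toNat = s.length := by omega
        rw [this, hdec]
        simp
      have hslice2 : PySem.List.slice cs (some (PySem.Chars.find cs ['.'] + 1)) none = t := by
        rw [PySem.List.slice_from cs (by omega)]
        have htn : (PySem.Chars.find cs ['.'] + 1).toNat = s.length + 1 := by omega
        rw [htn, hdec]
        rw [show s ++ '.' :: t = (s ++ ['.']) ++ t from by simp]
        rw [show s.length + 1 = (s ++ ['.']).length from by simp]
        simp
      have hts : t.length ≤ n := by
        rw [hdec] at hle
        simp at hle
        omega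
      rw [hslice1, hslice2, tok_eq s hns, ih t hts, hdec, splitOn_head_split '.' s t hns,
        List.flatMap_cons]

theorem alt_eq (cs : List Char) :
    ResiRangeAltChars cs = (PySem.Chars.splitOn cs ['.']).flatMap pvTok :=
  alt_eq_aux cs.length cs le_rfl

-- ===== VERDICT (by name: the statement is the Claim_ definition above) =====
theorem ResiRange_spec : Claim_equal_ResiRange := by
  intro resi _ _
  unfold Spec_ResiRange ResiRange ResiRange_alt
  rw [fold_eq, alt_eq]
  simp
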